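-- pv_equiv track=rewrite | github.com/jcapo96/FBG_TMS | ana_tools/setters.py | find_zero_derivative_regions
-- ===== SOURCE A (Python) =====
-- def find_zero_derivative_regions(curve, threshold):
--     """
--     Given a list of numbers representing a curve and a threshold for the minimum region length,
--     returns a list of tuples representing the regions where the derivative of the curve is zero
--     and has a length above the threshold.
--     Each tuple contains the start and end indices of a region.
--     """
--     zero_regions = []
--     start_idx = None
--     for i in range(len(curve) - 1):
--         if curve[i] == curve[i + 1]:
--             if start_idx is None:
--                 start_idx = i
--         elif start_idx is not None:
--             region_length = i - start_idx
--             if region_length >= threshold: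
--                 zero_regions.append((start_idx, i))
--             start_idx = None
--     if start_idx is not None:
--         region_length = len(curve) - 1 - start_idx
--         if region_length >= threshold:
--             zero_regions.append((start_idx, len(curve) - 1))
--     return zero_regions
-- ===== SOURCE B (Python) =====
-- def find_zero_derivative_regions(curve, threshold):
--     """Runs-table reformulation: first collect all maximal runs of equal
--     consecutive values as (start, end) index pairs in one scan, then filter
--     the runs that contain at least one equal pair (end > start) and whose
--     length end - start meets the threshold."""
--     n = len(curve)
--     runs = []
--     i = 0
--     while i < n:
--         j = i
--         while j + 1 < n and curve[j + 1] == curve[j]: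
--             j += 1
--         runs.append((i, j))
--         i = j + 1
--     return [(s, e) for (s, e) in runs if e > s and e - s >= threshold]
-- ===== Notes on version B (the rewrite author's own statement) =====
-- stated objective: alternative
-- what changed: Replaced A's single stateful scan with start_idx boundary tracking and an end-of-loop flush by a two-phase algorithm: one scan building the explicit table of maximal runs of equal values, then a comprehension filtering runs with end > start and end - start >= threshold.
import Mathlib
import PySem

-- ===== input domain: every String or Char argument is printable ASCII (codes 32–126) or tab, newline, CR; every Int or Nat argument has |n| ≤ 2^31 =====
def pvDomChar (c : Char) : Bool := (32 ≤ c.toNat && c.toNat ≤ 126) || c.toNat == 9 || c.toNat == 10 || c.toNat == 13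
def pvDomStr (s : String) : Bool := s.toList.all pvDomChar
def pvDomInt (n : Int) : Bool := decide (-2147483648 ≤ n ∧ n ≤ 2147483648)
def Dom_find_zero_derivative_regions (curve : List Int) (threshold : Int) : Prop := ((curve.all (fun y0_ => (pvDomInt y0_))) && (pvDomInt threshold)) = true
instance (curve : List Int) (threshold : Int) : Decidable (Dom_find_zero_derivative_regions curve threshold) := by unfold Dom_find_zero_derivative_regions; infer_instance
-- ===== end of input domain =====

-- B is an alternative decomposition (explicit runs table + filter) of A's stateful scan; same O(n) cost.
-- ===== PORT A =====
-- A's for-loop over range(len(curve)-1) with state (zero_regions, start_idx), then the final flush.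
-- Indices i and i+1 are always in range inside the loop, so List.getD is exact for curve[i].
def fzdrA_loop (curve : List Int) (threshold : Int) (i : Nat)
    (regs : List (Int × Int)) (start : Option Nat) : List (Int × Int) :=
  if _h : i < curve.length - 1 then
    if curve.getD i 0 = curve.getD (i + 1) 0 then
      match start with
      | none => fzdrA_loop curve threshold (i + 1) regs (some i)
      | some _ => fzdrA_loop curve threshold (i + 1) regs start
    else
      match start with
      | some s0 =>
          fzdrA_loop curve threshold (i + 1)
            (if (i : Int) - (s0 : Int) ≥ threshold then regs ++ [((s0 : Int), (i : Int))] else regs)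
            none
      | none => fzdrA_loop curve threshold (i + 1) regs none
  else
    match start with
    | some s0 =>
        if (curve.length : Int) - 1 - (s0 : Int) ≥ threshold then
          regs ++ [((s0 : Int), (curve.length : Int) - 1)]
        else regs
    | none => regs
termination_by curve.length - 1 - i

def find_zero_derivative_regions (curve : List Int) (threshold : Int) : List (Int × Int) :=
  fzdrA_loop curve threshold 0 [] none

-- ===== PORT B =====
-- inner while loop: extend the run starting at (or containing) j to its maximal end index
def fzdrB_extend (curve : List Int) (j : Nat) : Nat :=
  if h : j + 1 < curve.length ∧ curve.getD (j + 1) 0 = curve.getD j 0 then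
    fzdrB_extend curve (j + 1)
  else j
termination_by curve.length - j
decreasing_by omega

-- outer while loop: the table of maximal runs (start, end)
theorem fzdrB_extend_ge (curve : List Int) (j : Nat) : j ≤ fzdrB_extend curve j := by
  unfold fzdrB_extend
  split
  · exact Nat.le_trans (Nat.le_succ j) (fzdrB_extend_ge curve (j + 1))
  · exact Nat.le_refl j
termination_by curve.length - j
decreasing_by omega

def fzdrB_runs (curve : List Int) (i : Nat) : List (Nat × Nat) :=
  if h : i < curve.length then
    let j := fzdrB_extend curve i
    (i, j) :: fzdrB_runs curve (j + 1)
  else []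
termination_by curve.length - i
decreasing_by have := fzdrB_extend_ge curve i; omega

def find_zero_derivative_regions_alt (curve : List Int) (threshold : Int) : List (Int × Int) :=
  (fzdrB_runs curve 0).filterMap (fun p =>
    if p.2 > p.1 ∧ (p.2 : Int) - (p.1 : Int) ≥ threshold then
      some ((p.1 : Int), (p.2 : Int))
    else none)

-- ===== PRECONDITION & SPEC =====
def Spec_find_zero_derivative_regions (curve : List Int) (threshold : Int) (out : List (Int × Int)) : Prop := out = find_zero_derivative_regions_alt curve threshold
instance (curve : List Int) (threshold : Int) (out : List (Int × Int)) : Decidable (Spec_find_zero_derivative_regions curve threshold out) := by unfold Spec_find_zero_derivative_regions; infer_instance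

-- ===== CLAIM (what is proved, stated in full; the proofs are below) =====
def Claim_equal_find_zero_derivative_regions : Prop := ∀ (curve : List Int) (threshold : Int), Dom_find_zero_derivative_regions curve threshold → Spec_find_zero_derivative_regions curve threshold (find_zero_derivative_regions curve threshold)

-- ===== LEMMAS AND PROOFS =====

def fzdrOut (threshold : Int) (runs : List (Nat × Nat)) : List (Int × Int) :=
  runs.filterMap (fun p =>
    if p.2 > p.1 ∧ (p.2 : Int) - (p.1 : Int) ≥ threshold then
      some ((p.1 : Int), (p.2 : Int))
    else none)

theorem fzdrB_extend_eq_self (curve : List Int) (j : Nat)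
    (h : ¬ (j + 1 < curve.length ∧ curve.getD (j + 1) 0 = curve.getD j 0)) :
    fzdrB_extend curve j = j := by
  unfold fzdrB_extend; rw [dif_neg h]

theorem fzdrB_extend_step (curve : List Int) (j : Nat)
    (h : j + 1 < curve.length ∧ curve.getD (j + 1) 0 = curve.getD j 0) :
    fzdrB_extend curve j = fzdrB_extend curve (j + 1) := by
  conv_lhs => unfold fzdrB_extend
  rw [dif_pos h]

theorem fzdrB_runs_nil (curve : List Int) (i : Nat) (h : ¬ i < curve.length) :
    fzdrB_runs curve i = [] := by
  unfold fzdrB_runs; simp [h]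

theorem fzdrB_runs_cons (curve : List Int) (i : Nat) (h : i < curve.length) :
    fzdrB_runs curve i = (i, fzdrB_extend curve i) :: fzdrB_runs curve (fzdrB_extend curve i + 1) := by
  conv_lhs => unfold fzdrB_runs
  simp [h]

-- The joint invariant: A's loop from index i with state none produces exactly the
-- filtered runs from i; with state some s0 (run from s0 alive through pair (i-1,i))
-- it produces the filtered run (s0, extend i) followed by the filtered runs after it.
theorem fzdr_main (curve : List Int) (threshold : Int) :
    ∀ k i, curve.length - i ≤ k →
      (∀ regs, fzdrA_loop curve threshold i regs none = regs ++ fzdrOut threshold (fzdrB_runs curve i)) ∧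
      (∀ regs s0, s0 < i → i < curve.length →
        (∀ m, s0 ≤ m → m < i → curve.getD m 0 = curve.getD (m + 1) 0) →
        fzdrA_loop curve threshold i regs (some s0) =
          regs ++ (if ((fzdrB_extend curve i : Int)) - (s0 : Int) ≥ threshold
                    then [((s0 : Int), ((fzdrB_extend curve i : Int)))] else [])
               ++ fzdrOut threshold (fzdrB_runs curve (fzdrB_extend curve i + 1))) := by
  intro k
  induction k with
  | zero =>
      intro i hk
      constructor
      · intro regs
        have hni : ¬ i < curve.length := by omega
        rw [fzdrB_runs_nil curve i hni]
        unfold fzdrA_loop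
        have : ¬ i < curve.length - 1 := by omega
        simp [this, fzdrOut]
      · intro regs s0 hs hi _
        omega
  | succ k ih =>
      intro i hk
      constructor
      · -- none state
        intro regs
        by_cases hlt : i < curve.length - 1
        · by_cases heq : curve.getD i 0 = curve.getD (i + 1) 0
          · -- start a run at i
            have hrec : fzdrA_loop curve threshold i regs none
                = fzdrA_loop curve threshold (i + 1) regs (some i) := by
              conv_lhs => unfold fzdrA_loop
              rw [dif_pos hlt, if_pos heq]
            rw [hrec]
            have hsome := (ih (i + 1) (by omega)).2 regs i (by omega) (by omega)
              (by intro m hm1 hm2; have : m = i := by omega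
                  subst this; exact heq)
            rw [hsome]
            -- B side: runs from i start with (i, extend i), extend i = extend (i+1) > i
            have hstep : fzdrB_extend curve i = fzdrB_extend curve (i + 1) :=
              fzdrB_extend_step curve i ⟨by omega, by rw [heq]⟩
            have hge : i + 1 ≤ fzdrB_extend curve (i + 1) := fzdrB_extend_ge curve (i + 1)
            rw [fzdrB_runs_cons curve i (by omega), hstep]
            simp only [fzdrOut, List.filterMap_cons]
            have hgt : fzdrB_extend curve (i + 1) > i := by omega
            by_cases hth : ((fzdrB_extend curve (i + 1) : Int)) - (i : Int) ≥ threshold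
            · simp [hgt, hth]
            · simp [hgt, hth]
          · -- unequal pair, stay none
            have hrec : fzdrA_loop curve threshold i regs none
                = fzdrA_loop curve threshold (i + 1) regs none := by
              conv_lhs => unfold fzdrA_loop
              rw [dif_pos hlt, if_neg heq]
            rw [hrec, (ih (i + 1) (by omega)).1 regs]
            have hext : fzdrB_extend curve i = i := by
              apply fzdrB_extend_eq_self
              intro hc; exact heq hc.2.symm
            rw [fzdrB_runs_cons curve i (by omega), hext]
            simp [fzdrOut]
        · -- loop exit with state none
          have hrec : fzdrA_loop curve threshold i regs none = regs := by
            unfold fzdrA_loop; simp [hlt]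
          rw [hrec]
          by_cases hi : i < curve.length
          · -- i = length - 1: single trailing singleton run, filtered out
            have hil : i = curve.length - 1 := by omega
            have hext : fzdrB_extend curve i = i := by
              apply fzdrB_extend_eq_self; intro hc; omega
            rw [fzdrB_runs_cons curve i hi, hext,
                fzdrB_runs_nil curve (i + 1) (by omega)]
            simp [fzdrOut]
          · rw [fzdrB_runs_nil curve i hi]; simp [fzdrOut]
      · -- some s0 state
        intro regs s0 hs hi hchain
        by_cases hlt : i < curve.length - 1
        · by_cases heq : curve.getD i 0 = curve.getD (i + 1) 0
          · -- run continues
            have hrec : fzdrA_loop curve threshold i regs (some s0)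
                = fzdrA_loop curve threshold (i + 1) regs (some s0) := by
              conv_lhs => unfold fzdrA_loop
              rw [dif_pos hlt, if_pos heq]
            have hstep : fzdrB_extend curve i = fzdrB_extend curve (i + 1) :=
              fzdrB_extend_step curve i ⟨by omega, by rw [heq]⟩
            rw [hrec, (ih (i + 1) (by omega)).2 regs s0 (by omega) (by omega)
              (by intro m hm1 hm2
                  by_cases hmi : m < i
                  · exact hchain m hm1 hmi
                  · have : m = i := by omega
                    subst this; exact heq), hstep]
          · -- run ends at i: flush
            have hext : fzdrB_extend curve i = i := by
              apply fzdrB_extend_eq_self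
              intro hc; exact heq hc.2.symm
            have hrec : fzdrA_loop curve threshold i regs (some s0)
                = fzdrA_loop curve threshold (i + 1)
                    (if (i : Int) - (s0 : Int) ≥ threshold then regs ++ [((s0 : Int), (i : Int))] else regs)
                    none := by
              conv_lhs => unfold fzdrA_loop
              rw [dif_pos hlt, if_neg heq]
            rw [hrec, (ih (i + 1) (by omega)).1, hext]
            by_cases hth : (i : Int) - (s0 : Int) ≥ threshold
            · simp [hth]
            · simp [hth]
        · -- loop exit with some s0: final flush; i = length - 1
          have hil : i = curve.length - 1 := by omega
          have hext : fzdrB_extend curve i = i := by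
            apply fzdrB_extend_eq_self; intro hc; omega
          have hrec : fzdrA_loop curve threshold i regs (some s0)
              = if (curve.length : Int) - 1 - (s0 : Int) ≥ threshold
                then regs ++ [((s0 : Int), (curve.length : Int) - 1)] else regs := by
            unfold fzdrA_loop; simp [hlt]
          rw [hrec, hext, fzdrB_runs_nil curve (i + 1) (by omega)]
          have hlen : (curve.length : Int) - 1 = (i : Int) := by
            have : 1 ≤ curve.length := by omega
            omega
          rw [hlen]
          by_cases hth : (i : Int) - (s0 : Int) ≥ threshold
          · simp [hth, fzdrOut]
          · simp [hth, fzdrOut]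

-- ===== VERDICT (by name: the statement is the Claim_ definition above) =====
theorem find_zero_derivative_regions_spec : Claim_equal_find_zero_derivative_regions := by
  intro curve threshold _
  unfold Spec_find_zero_derivative_regions find_zero_derivative_regions find_zero_derivative_regions_alt
  have h := (fzdr_main curve threshold (curve.length) 0 (by omega)).1 []
  rw [h]
  simp [fzdrOut]
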